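-- pv_equiv track=rewrite | github.com/ranganathanlab/BCAR | BCAR/BCAR_v1_15.py | extract_read_paired
-- ===== SOURCE A (Python) =====
-- twobit_basespace    = {'A':0, 'C':1, 'G':2, 'T':3}
--
-- def extract_read_paired(fwd_read, fwd_qscore, rev_read, rev_qscore, min_qscore, bc_start, bc_len, bc_end):
--     # Add quality filters here
--     # check qscores
--     for q in fwd_qscore[:-1]:
--         if ord(q) < min_qscore:
--             return None, None, None
--     for q in rev_qscore[:-1]:
--         if ord(q) < min_qscore:
--             return None, None, None
--     # Make sure you're not trying to grab a barcode from a read that's too short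
--     if len(fwd_read) <= bc_len:
--         return None, None, None
--
--     bc_int  = seq_to_twobit(fwd_read[bc_start:bc_end])
--     fwd_int = seq_to_twobit(fwd_read[:-1])
--     rev_int = seq_to_twobit(rev_read[:-1])
--     return bc_int, fwd_int, rev_int
--
-- def seq_to_twobit(seq, encode_size = 4):
--     # converts a string of bases into an integer for data compression
--     # only accepts A,C,G,T, so filter reads before getting here
--     int_list = [twobit_basespace[seq[i]]*encode_size**i for i in range(len(seq))]
--     #add capping "C" to prevent trailing A's from getting ignored (since they would add zero)
--     int_list.append(encode_size**len(seq))
--     return sum(int_list)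
-- ===== SOURCE B (Python) =====
-- twobit_basespace = {'A': 0, 'C': 1, 'G': 2, 'T': 3}
--
-- def _seq_encode(seq, encode_size=4):
--     # Horner's method over the reversed sequence; the initial 1 is the capping term.
--     acc = 1
--     for base in reversed(seq):
--         acc = acc * encode_size + twobit_basespace[base]
--     return acc
--
-- def _clean(qscore, min_qscore):
--     return all(ord(q) >= min_qscore for q in qscore[:-1])
--
-- def extract_read_paired(fwd_read, fwd_qscore, rev_read, rev_qscore, min_qscore, bc_start, bc_len, bc_end):
--     if len(fwd_read) > bc_len and _clean(fwd_qscore, min_qscore) and _clean(rev_qscore, min_qscore):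
--         return (_seq_encode(fwd_read[bc_start:bc_end]),
--                 _seq_encode(fwd_read[:-1]),
--                 _seq_encode(rev_read[:-1]))
--     return None, None, None
-- ===== Notes on version B (the rewrite author's own statement) =====
-- stated objective: idiomatic
-- what changed: Base-to-integer encoding is rewritten as Horner's method over the reversed sequence (accumulator seeded with the capping 1) instead of summing explicitly power-weighted terms of a built list, and the three quality/length guards are recomposed into one positive all()-based condition.
import Mathlib
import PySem

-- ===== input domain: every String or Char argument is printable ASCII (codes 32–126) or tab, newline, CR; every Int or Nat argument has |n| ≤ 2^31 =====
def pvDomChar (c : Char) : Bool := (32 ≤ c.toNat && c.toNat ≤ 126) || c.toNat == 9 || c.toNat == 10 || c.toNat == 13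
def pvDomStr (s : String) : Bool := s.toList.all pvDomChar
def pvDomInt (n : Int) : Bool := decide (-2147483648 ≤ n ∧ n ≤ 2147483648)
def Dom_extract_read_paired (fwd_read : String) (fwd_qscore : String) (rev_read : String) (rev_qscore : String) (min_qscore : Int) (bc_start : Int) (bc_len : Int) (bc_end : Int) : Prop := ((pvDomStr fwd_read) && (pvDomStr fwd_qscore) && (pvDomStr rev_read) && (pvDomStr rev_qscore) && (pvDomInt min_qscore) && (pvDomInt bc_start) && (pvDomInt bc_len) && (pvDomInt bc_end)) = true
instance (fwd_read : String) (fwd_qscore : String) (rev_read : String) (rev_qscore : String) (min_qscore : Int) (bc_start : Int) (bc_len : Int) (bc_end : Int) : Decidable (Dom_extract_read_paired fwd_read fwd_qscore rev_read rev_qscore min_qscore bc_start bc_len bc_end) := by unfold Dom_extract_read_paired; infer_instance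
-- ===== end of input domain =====

-- B replaces the explicit power-weighted sum by Horner's method over the reversed
-- sequence and recomposes the three guards into one positive all()-condition (idiomatic).

-- ===== PORT A =====
def twobit_basespace : PySem.Dict Char Int :=
  PySem.Dict.ofList [('A', 0), ('C', 1), ('G', 2), ('T', 3)]

-- A's helper: [tb[seq[i]]*es**i for i in range(len(seq))] + [es**len(seq)], summed.
-- Indices from range are ≥ 0 so es ** i is ported as es ^ i.toNat (exact there);
-- a KeyError base is outside Pre_ (the lookup's getD 0 is never reached inside Pre_).
def seq_to_twobit (seq : List Char) (encode_size : Int) : Int :=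
  let int_list := (PySem.List.pyRange 0 (seq.length : Int) 1).map
    (fun i => (twobit_basespace.getD (PySem.List.pyGetD seq i ' ') 0) * encode_size ^ i.toNat)
  (int_list ++ [encode_size ^ seq.length]).sum

def extract_read_paired (fwd_read : String) (fwd_qscore : String) (rev_read : String) (rev_qscore : String) (min_qscore : Int) (bc_start : Int) (bc_len : Int) (bc_end : Int) : Option Int × Option Int × Option Int :=
  if (PySem.List.slice fwd_qscore.toList none (some (-1))).any
       (fun q => decide ((q.toNat : Int) < min_qscore)) then (none, none, none)
  else if (PySem.List.slice rev_qscore.toList none (some (-1))).any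
       (fun q => decide ((q.toNat : Int) < min_qscore)) then (none, none, none)
  else if (fwd_read.toList.length : Int) ≤ bc_len then (none, none, none)
  else
    (some (seq_to_twobit (PySem.List.slice fwd_read.toList (some bc_start) (some bc_end)) 4),
     some (seq_to_twobit (PySem.List.slice fwd_read.toList none (some (-1))) 4),
     some (seq_to_twobit (PySem.List.slice rev_read.toList none (some (-1))) 4))

-- ===== PORT B =====
-- Horner: acc = 1; for base in reversed(seq): acc = acc*es + tb[base]
def seq_encode_alt (seq : List Char) (encode_size : Int) : Int :=
  seq.reverse.foldl (fun acc c => acc * encode_size + twobit_basespace.getD c 0) 1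

def clean_alt (qscore : List Char) (min_qscore : Int) : Bool :=
  (PySem.List.slice qscore none (some (-1))).all (fun q => decide (min_qscore ≤ (q.toNat : Int)))

def extract_read_paired_alt (fwd_read : String) (fwd_qscore : String) (rev_read : String) (rev_qscore : String) (min_qscore : Int) (bc_start : Int) (bc_len : Int) (bc_end : Int) : Option Int × Option Int × Option Int :=
  if decide (bc_len < (fwd_read.toList.length : Int))
       && clean_alt fwd_qscore.toList min_qscore
       && clean_alt rev_qscore.toList min_qscore then
    (some (seq_encode_alt (PySem.List.slice fwd_read.toList (some bc_start) (some bc_end)) 4),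
     some (seq_encode_alt (PySem.List.slice fwd_read.toList none (some (-1))) 4),
     some (seq_encode_alt (PySem.List.slice rev_read.toList none (some (-1))) 4))
  else (none, none, none)

-- ===== PRECONDITION & SPEC =====
def pvLowQ (qs : String) (m : Int) : Bool := qs.toList.dropLast.any (fun c => decide ((c.toNat : Int) < m))
def pvACGT (c : Char) : Bool := c == 'A' || c == 'C' || c == 'G' || c == 'T'
-- Pre_ excludes exactly the inputs where A raises KeyError: the encoding phase is
-- reached (no low-quality early return, read long enough) and some encoded base is not A/C/G/T.
def Pre_extract_read_paired (fwd_read : String) (fwd_qscore : String) (rev_read : String) (rev_qscore : String) (min_qscore : Int) (bc_start : Int) (bc_len : Int) (bc_end : Int) : Prop :=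
  (pvLowQ fwd_qscore min_qscore || pvLowQ rev_qscore min_qscore ||
   decide ((fwd_read.toList.length : Int) ≤ bc_len) ||
   ((PySem.List.slice fwd_read.toList (some bc_start) (some bc_end)).all pvACGT &&
    fwd_read.toList.dropLast.all pvACGT && rev_read.toList.dropLast.all pvACGT)) = true
instance (fwd_read : String) (fwd_qscore : String) (rev_read : String) (rev_qscore : String) (min_qscore : Int) (bc_start : Int) (bc_len : Int) (bc_end : Int) : Decidable (Pre_extract_read_paired fwd_read fwd_qscore rev_read rev_qscore min_qscore bc_start bc_len bc_end) := by
  unfold Pre_extract_read_paired; infer_instance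

def pvWitness_extract_read_paired : String × String × String × String × Int × Int × Int × Int :=
  ("ACGT", "KKKK", "ACG", "KKK", 35, 0, 2, 2)

def Spec_extract_read_paired (fwd_read : String) (fwd_qscore : String) (rev_read : String) (rev_qscore : String) (min_qscore : Int) (bc_start : Int) (bc_len : Int) (bc_end : Int) (out : Option Int × Option Int × Option Int) : Prop := out = extract_read_paired_alt fwd_read fwd_qscore rev_read rev_qscore min_qscore bc_start bc_len bc_end
instance (fwd_read : String) (fwd_qscore : String) (rev_read : String) (rev_qscore : String) (min_qscore : Int) (bc_start : Int) (bc_len : Int) (bc_end : Int) (out : Option Int × Option Int × Option Int) : Decidable (Spec_extract_read_paired fwd_read fwd_qscore rev_read rev_qscore min_qscore bc_start bc_len bc_end out) := by unfold Spec_extract_read_paired; infer_instance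

-- ===== CLAIM (what is proved, stated in full; the proofs are below) =====
def Claim_equal_extract_read_paired : Prop := ∀ (fwd_read : String) (fwd_qscore : String) (rev_read : String) (rev_qscore : String) (min_qscore : Int) (bc_start : Int) (bc_len : Int) (bc_end : Int), Dom_extract_read_paired fwd_read fwd_qscore rev_read rev_qscore min_qscore bc_start bc_len bc_end → Pre_extract_read_paired fwd_read fwd_qscore rev_read rev_qscore min_qscore bc_start bc_len bc_end → Spec_extract_read_paired fwd_read fwd_qscore rev_read rev_qscore min_qscore bc_start bc_len bc_end (extract_read_paired fwd_read fwd_qscore rev_read rev_qscore min_qscore bc_start bc_len bc_end)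

-- ===== LEMMAS AND PROOFS =====
-- A's power-weighted sum over range(len) equals the Horner fold (the +e^len capping
-- term is Horner's initial accumulator 1).
theorem sum_pow_eq_foldr (d : Char → Int) (e : Int) (t : List Char) :
    ((List.range t.length).map (fun k => d (t.getD k ' ') * e ^ k)).sum + e ^ t.length
      = t.foldr (fun c acc => acc * e + d c) 1 := by
  induction t with
  | nil => simp
  | cons c t ih =>
      rw [List.length_cons, List.range_succ_eq_map, List.map_cons, List.map_map, List.sum_cons]
      have hm : List.map ((fun k => d ((c :: t).getD k ' ') * e ^ k) ∘ Nat.succ) (List.range t.length)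
          = List.map (fun k => (d (t.getD k ' ') * e ^ k) * e) (List.range t.length) := by
        apply List.map_congr_left; intro k hk
        simp only [Function.comp_apply, List.getD_cons_succ, pow_succ]; ring
      rw [hm, List.sum_map_mul_right, List.foldr_cons, ← ih]
      simp [pow_succ]; ring

-- The two encoders agree on every sequence.
theorem seq_encode_agree (seq : List Char) (e : Int) :
    seq_to_twobit seq e = seq_encode_alt seq e := by
  unfold seq_to_twobit seq_encode_alt
  rw [List.foldl_reverse]
  show ((PySem.List.pyRange 0 (seq.length : Int) 1).map _ ++ _).sum = _
  rw [PySem.List.pyRange_zero_nat, List.map_map, List.sum_append]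
  have hm := List.map_congr_left (l := List.range seq.length)
    (f := (fun i => twobit_basespace.getD (PySem.List.pyGetD seq i ' ') 0 * e ^ i.toNat) ∘ (fun k : Nat => (k : Int)))
    (g := fun k : Nat => twobit_basespace.getD (seq.getD k ' ') 0 * e ^ k)
    (by intro k hk; simp [Function.comp, PySem.List.pyGetD_natCast])
  rw [hm]
  simp only [List.sum_cons, List.sum_nil, add_zero]
  exact sum_pow_eq_foldr (fun c => twobit_basespace.getD c 0) e seq

-- A's negative quality test on a dropped-last slice is the negation of B's clean_alt.
theorem qfail_eq_not_clean (qs : List Char) (m : Int) :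
    ((PySem.List.slice qs none (some (-1))).any fun q => decide ((q.toNat : Int) < m))
      = !(clean_alt qs m) := by
  unfold clean_alt
  rw [Bool.eq_iff_iff]
  simp [List.any_eq_true]

theorem extract_read_paired_spec : Claim_equal_extract_read_paired := by
  intro fr fq rr rq m bs bl be _ _
  unfold Spec_extract_read_paired extract_read_paired extract_read_paired_alt
  rw [qfail_eq_not_clean fq.toList m, qfail_eq_not_clean rq.toList m]
  by_cases h1 : clean_alt fq.toList m = true <;>
    by_cases h2 : clean_alt rq.toList m = true <;>
      by_cases h3 : bl < (fr.toList.length : Int) <;>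
        simp_all [seq_encode_agree]
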